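-- pv_equiv track=rewrite | github.com/Moataz0000/codeforces_problem_solving | 94.py | is_there_7_players
-- ===== SOURCE A (Python) =====
-- def is_there_7_players(players: list[str]):
--     counter = 1
--
--     for i in range(1, len(players)):
--         if players[i] == players[i - 1]:
--             counter += 1
--             if counter >= 7:
--                 return True
--         else:
--             counter = 1
--     return False
-- ===== SOURCE B (Python) =====
-- def _runs(players):
--     """Maximal runs of consecutive equal names, as (name, length) pairs."""
--     runs = []
--     i = 0
--     n = len(players)
--     while i < n:
--         j = i + 1
--         while j < n and players[j] == players[i]:
--             j += 1
--         runs.append((players[i], j - i))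
--         i = j
--     return runs
--
--
-- def is_there_7_players(players: list[str]):
--     return any(length >= 7 for _, length in _runs(players))
-- ===== Notes on version B (the rewrite author's own statement) =====
-- stated objective: alternative
-- what changed: B first partitions the list into maximal runs of consecutive equal names (a groupby-style two-level scan) and then separately tests whether any run length reaches 7, instead of threading a manual counter with an early return through a single index loop.
import Mathlib
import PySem

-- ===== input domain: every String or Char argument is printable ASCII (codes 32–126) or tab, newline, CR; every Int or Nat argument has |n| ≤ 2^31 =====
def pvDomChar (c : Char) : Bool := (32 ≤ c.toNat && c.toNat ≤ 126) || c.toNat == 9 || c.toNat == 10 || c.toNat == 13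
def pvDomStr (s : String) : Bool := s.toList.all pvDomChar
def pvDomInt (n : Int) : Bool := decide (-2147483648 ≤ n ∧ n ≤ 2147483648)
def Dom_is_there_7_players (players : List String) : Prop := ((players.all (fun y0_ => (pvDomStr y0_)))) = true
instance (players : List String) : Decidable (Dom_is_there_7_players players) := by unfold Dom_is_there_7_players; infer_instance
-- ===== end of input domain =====

-- B partitions the list into maximal runs of consecutive equal names and then tests run lengths; same O(n) cost, different decomposition.

-- ===== PORT A =====
-- the for-loop over range(1, len(players)): prev is players[i-1], c the running counter; early 'return True' is the 'true' branch
def pvLoopA : List String → String → Int → Bool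
  | [], _, _ => false
  | x :: xs, prev, c =>
      if x == prev then
        (if 7 ≤ c + 1 then true else pvLoopA xs x (c + 1))
      else pvLoopA xs x 1

def is_there_7_players (players : List String) : Bool :=
  match players with
  | [] => false
  | p :: rest => pvLoopA rest p 1

-- ===== PORT B =====
-- inner while of _runs: counts the rest of the current run (n = count so far); outer while = starting a new run on the next distinct name
def pvRunsGo (x : String) (n : Int) : List String → List (String × Int)
  | [] => [(x, n)]
  | y :: ys => if y == x then pvRunsGo x (n + 1) ys else (x, n) :: pvRunsGo y 1 ys

def is_there_7_players_alt (players : List String) : Bool :=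
  (match players with
   | [] => []
   | x :: xs => pvRunsGo x 1 xs).any (fun r => decide (7 ≤ r.2))

-- ===== PRECONDITION & SPEC =====
def Spec_is_there_7_players (players : List String) (out : Bool) : Prop := out = is_there_7_players_alt players
instance (players : List String) (out : Bool) : Decidable (Spec_is_there_7_players players out) := by unfold Spec_is_there_7_players; infer_instance

-- ===== CLAIM (what is proved, stated in full; the proofs are below) =====
def Claim_equal_is_there_7_players : Prop := ∀ (players : List String), Dom_is_there_7_players players → Spec_is_there_7_players players (is_there_7_players players)

-- ===== LEMMAS AND PROOFS =====

-- once the counter has reached 7, the run it sits in keeps length ≥ 7, so B reports true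
theorem pvRunsGo_big (ys : List String) : ∀ (x : String) (n : Int), 7 ≤ n →
    (pvRunsGo x n ys).any (fun r => decide (7 ≤ r.2)) = true := by
  induction ys with
  | nil => intro x n h; simp [pvRunsGo, h]
  | cons y ys ih =>
      intro x n h
      by_cases hxy : y = x
      · simp only [pvRunsGo, hxy, beq_self_eq_true, if_true]
        exact ih x (n + 1) (by omega)
      · simp only [pvRunsGo, beq_eq_false_iff_ne.mpr hxy, Bool.false_eq_true, if_false,
          List.any_cons]
        simp [h]

-- while the counter is below 7, A's loop answers exactly "some remaining run (counting n so far) reaches 7"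
theorem pvLoopA_eq_runs (ys : List String) : ∀ (x : String) (c : Int), c < 7 →
    pvLoopA ys x c = (pvRunsGo x c ys).any (fun r => decide (7 ≤ r.2)) := by
  induction ys with
  | nil => intro x c hc; simp [pvLoopA, pvRunsGo]; omega
  | cons y ys ih =>
      intro x c hc
      by_cases hxy : y = x
      · subst hxy
        simp only [pvLoopA, pvRunsGo, beq_self_eq_true, if_true]
        by_cases h7 : 7 ≤ c + 1
        · simp [h7, (pvRunsGo_big ys y (c + 1) h7).symm]
        · simp only [if_neg h7]
          exact ih y (c + 1) (by omega)
      · simp only [pvLoopA, pvRunsGo, beq_eq_false_iff_ne.mpr hxy, Bool.false_eq_true, if_false,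
          List.any_cons]
        rw [ih y 1 (by omega)]
        simp; omega

-- ===== VERDICT (by name: the statement is the Claim_ definition above) =====
theorem is_there_7_players_spec : Claim_equal_is_there_7_players := by
  intro players _
  unfold Spec_is_there_7_players is_there_7_players is_there_7_players_alt
  cases players with
  | nil => rfl
  | cons p rest => exact pvLoopA_eq_runs rest p 1 (by omega)
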